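-- pv_equiv track=rewrite | github.com/oslanaslan/graph_tools | graph_isohrones/python/geohash_utils.py | _hash2xy
-- ===== SOURCE A (Python) =====
-- def _hash2xy(hashcode, dim):
--     """Convert hashcode to (x, y).
--
--     Based on the implementation here:
--         https://en.wikipedia.org/w/index.php?title=Hilbert_curve&oldid=797332503
--
--     Pure python implementation.
--
--     Parameters:
--         hashcode: int  Hashcode to decode [0, dim**2)
--         dim: int       Number of coding points each x, y value can take.
--                        Corresponds to 2^level of the hilbert curve.
--
--     Returns:
--         Tuple[int, int]: (x, y) point in dim x dim-grid system
--     """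
--     assert (hashcode <= dim * dim - 1)
--     x = y = 0
--     lvl = 1
--     while lvl < dim:
--         rx = 1 & (hashcode >> 1)
--         ry = 1 & (hashcode ^ rx)
--         x, y = _rotate(lvl, x, y, rx, ry)
--         x += lvl * rx
--         y += lvl * ry
--         hashcode >>= 2
--         lvl <<= 1
--     return x, y
--
-- def _rotate(n, x, y, rx, ry):
--     """Rotate and flip a quadrant appropriately
--
--     Based on the implementation here:
--         https://en.wikipedia.org/w/index.php?title=Hilbert_curve&oldid=797332503
--
--     """
--     if ry == 0:
--         if rx == 1:
--             x = n - 1 - x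
--             y = n - 1 - y
--         return y, x
--     return x, y
-- ===== SOURCE B (Python) =====
-- # MSB-first state-machine Hilbert decoder: a 2-bit orientation state (swap, flip)
-- # replaces the original's per-step rotation of the accumulated point; the bits of
-- # x and y are emitted most-significant first.  Same assert, same result.
--
-- def _hash2xy(hashcode, dim):
--     assert (hashcode <= dim * dim - 1)
--     m = 0
--     while 2 ** m < dim:
--         m += 1
--     x = y = 0
--     sw = fl = False  # orientation state: swap axes / flip both coordinates
--     for k in range(m - 1, -1, -1):
--         q = (hashcode // 4 ** k) % 4
--         rx = q // 2
--         ry = (q + rx) % 2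
--         bx, by = (ry, rx) if sw else (rx, ry)
--         if fl:
--             bx, by = 1 - bx, 1 - by
--         x = 2 * x + bx
--         y = 2 * y + by
--         sw ^= q == 0 or q == 3
--         fl ^= q == 3
--     return x, y
-- ===== Notes on version B (the rewrite author's own statement) =====
-- stated objective: alternative
-- what changed: A decodes LSB-first, re-rotating the whole accumulated point at every doubling level; B decodes MSB-first with a 2-bit orientation state machine (swap/flip), emitting one bit of x and y per 2-bit chunk and never touching previously emitted bits.
import Mathlib
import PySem

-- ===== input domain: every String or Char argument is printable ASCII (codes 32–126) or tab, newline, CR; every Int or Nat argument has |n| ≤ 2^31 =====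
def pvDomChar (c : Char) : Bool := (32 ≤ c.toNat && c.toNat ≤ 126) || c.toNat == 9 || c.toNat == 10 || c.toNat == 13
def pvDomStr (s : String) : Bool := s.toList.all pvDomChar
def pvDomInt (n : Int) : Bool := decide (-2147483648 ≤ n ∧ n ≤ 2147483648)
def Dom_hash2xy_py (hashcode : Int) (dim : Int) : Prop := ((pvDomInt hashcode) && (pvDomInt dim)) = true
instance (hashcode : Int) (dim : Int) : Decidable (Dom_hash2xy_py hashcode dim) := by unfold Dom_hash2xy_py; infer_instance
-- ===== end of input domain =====

-- B replaces A's LSB-first loop (which re-rotates the accumulated point every step) by an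
-- MSB-first state-machine decoder emitting the bits of x and y directly; objective: alternative.

-- ===== PORT A =====
-- literal transliteration of _rotate
def pyRotate (n : Int) (x : Int) (y : Int) (rx : Int) (ry : Int) : Int × Int :=
  if ry = 0 then
    let xy := if rx = 1 then (n - 1 - x, n - 1 - y) else (x, y)
    (xy.2, xy.1)
  else (x, y)

-- the while-loop of _hash2xy; lvl starts at 1 and doubles, so it stays positive,
-- which makes (dim - lvl).toNat a decreasing termination measure
def aLoop (dim : Int) (hashcode : Int) (x : Int) (y : Int) (lvl : Int) (hpos : 0 < lvl) : Int × Int :=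
  if hlt : lvl < dim then
    let rx := PySem.Int.band 1 (hashcode >>> (1 : Nat))
    let ry := PySem.Int.band 1 (PySem.Int.bxor hashcode rx)
    let xy := pyRotate lvl x y rx ry
    aLoop dim (hashcode >>> (2 : Nat)) (xy.1 + lvl * rx) (xy.2 + lvl * ry) (lvl <<< (1 : Nat))
      (by rw [Int.shiftLeft_eq]; omega)
  else (x, y)
  termination_by (dim - lvl).toNat
  decreasing_by
    have h2 : lvl <<< (1 : Nat) = lvl * 2 ^ (1 : Nat) := Int.shiftLeft_eq lvl 1
    simp only [pow_one] at h2
    omega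

-- A's assert raises AssertionError exactly outside Pre_hash2xy_py below
def hash2xy_py (hashcode : Int) (dim : Int) : Int × Int :=
  aLoop dim hashcode 0 0 1 (by norm_num)

-- ===== PORT B =====
-- B's 'while 2 ** m < dim: m += 1' loop
def altSteps (dim : Int) (m : Nat) : Nat :=
  if h : (2 : Int) ^ m < dim then altSteps dim (m + 1) else m
  termination_by (dim - 2 ^ m).toNat
  decreasing_by
    have h1 : (0 : Int) < 2 ^ m := by positivity
    omega

-- one iteration of B's for-loop; state = (x, y, sw, fl)
def altBody (hashcode : Int) (st : Int × Int × Bool × Bool) (k : Nat) : Int × Int × Bool × Bool :=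
  let q := PySem.Int.mod (PySem.Int.floordiv hashcode (4 ^ k)) 4
  let rx := PySem.Int.floordiv q 2
  let ry := PySem.Int.mod (q + rx) 2
  let b1 := if st.2.2.1 then (ry, rx) else (rx, ry)
  let b2 := if st.2.2.2 then (1 - b1.1, 1 - b1.2) else b1
  (2 * st.1 + b2.1, 2 * st.2.1 + b2.2, (st.2.2.1 != (q == 0 || q == 3)), (st.2.2.2 != (q == 3)))

def hash2xy_py_alt (hashcode : Int) (dim : Int) : Int × Int :=
  let m := altSteps dim 0
  let r := (List.range m).reverse.foldl (altBody hashcode) (0, 0, false, false)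
  (r.1, r.2.1)

-- ===== PRECONDITION & SPEC =====
-- the assert in A (kept in B) raises AssertionError when hashcode > dim*dim - 1
def Pre_hash2xy_py (hashcode : Int) (dim : Int) : Prop := hashcode ≤ dim * dim - 1
instance (hashcode : Int) (dim : Int) : Decidable (Pre_hash2xy_py hashcode dim) := by unfold Pre_hash2xy_py; infer_instance

def pvWitness_hash2xy_py : Int × Int := (0, 2)

def Spec_hash2xy_py (hashcode : Int) (dim : Int) (out : Int × Int) : Prop := out = hash2xy_py_alt hashcode dim
instance (hashcode : Int) (dim : Int) (out : Int × Int) : Decidable (Spec_hash2xy_py hashcode dim out) := by unfold Spec_hash2xy_py; infer_instance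

-- ===== CLAIM (what is proved, stated in full; the proofs are below) =====
def Claim_equal_hash2xy_py : Prop := ∀ (hashcode : Int) (dim : Int), Dom_hash2xy_py hashcode dim → Pre_hash2xy_py hashcode dim → Spec_hash2xy_py hashcode dim (hash2xy_py hashcode dim)

-- ===== LEMMAS AND PROOFS =====

-- the j-th 2-bit chunk of h, and A's step on it at square size n
def q4 (h : Int) (j : Nat) : Int := (h / 4 ^ j) % 4

def astep (n : Int) (q : Int) (p : Int × Int) : Int × Int :=
  let rx := q / 2
  let ry := (q + rx) % 2
  let xy := pyRotate n p.1 p.2 rx ry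
  (xy.1 + n * rx, xy.2 + n * ry)

-- A's accumulated point after processing chunks 0..n-1 (LSB first)
def arec (h : Int) : Nat → Int × Int
  | 0 => (0, 0)
  | n + 1 => astep (2 ^ n) (q4 h n) (arec h n)

-- the orientation transform named by B's state (sw, fl) on an n × n square
def Tr (sw : Bool) (fl : Bool) (n : Int) (p : Int × Int) : Int × Int :=
  let p1 := if sw then (p.2, p.1) else p
  if fl then (n - 1 - p1.1, n - 1 - p1.2) else p1

-- one step of B, as a pure function of the current 2-bit chunk
def bstep (q x y : Int) (sw fl : Bool) : Int × Int × Bool × Bool :=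
  let rx := q / 2
  let ry := (q + rx) % 2
  let b1 := if sw then (ry, rx) else (rx, ry)
  let b2 := if fl then (1 - b1.1, 1 - b1.2) else b1
  (2 * x + b2.1, 2 * y + b2.2, (sw != (q == 0 || q == 3)), (fl != (q == 3)))

theorem bxor_emod_two (a b : Int) : PySem.Int.bxor a b % 2 = (a + b) % 2 := by
  unfold PySem.Int.bxor
  split_ifs with h1 h2 h2 <;>
    [have h3 := Nat.xor_mod_two_eq (m := a.toNat) (n := b.toNat);
     have h3 := Nat.xor_mod_two_eq (m := a.toNat) (n := (-b - 1).toNat);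
     have h3 := Nat.xor_mod_two_eq (m := (-a - 1).toNat) (n := b.toNat);
     have h3 := Nat.xor_mod_two_eq (m := (-a - 1).toNat) (n := (-b - 1).toNat)] <;>
    omega

theorem altSteps_not_lt (dim : Int) (j : Nat) : ¬ ((2 : Int) ^ altSteps dim j < dim) := by
  fun_induction altSteps dim j with
  | case1 m h ih => exact ih
  | case2 m h => exact h

theorem altSteps_lt (dim : Int) (j i : Nat) (h1 : j ≤ i) (h2 : i < altSteps dim j) :
    (2 : Int) ^ i < dim := by
  fun_induction altSteps dim j with
  | case1 m h ih =>
      rcases Nat.eq_or_lt_of_le h1 with rfl | hlt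
      · exact h
      · exact ih hlt h2
  | case2 m h => omega

theorem lt_iff_lt_altSteps (dim : Int) (i : Nat) : (2 : Int) ^ i < dim ↔ i < altSteps dim 0 := by
  constructor
  · intro h
    by_contra hc
    have hm := altSteps_not_lt dim 0
    have hle : (2 : Int) ^ altSteps dim 0 ≤ 2 ^ i :=
      pow_le_pow_right₀ (by norm_num) (by omega)
    omega
  · exact altSteps_lt dim 0 i (Nat.zero_le i)

theorem aLoop_foldl (h dim : Int) (cnt : Nat) :
    ∀ (j : Nat) (x y : Int), cnt = altSteps dim 0 - j →
      aLoop dim (h / 4 ^ j) x y (2 ^ j) (by positivity) =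
        List.foldl (fun p i => astep (2 ^ i) (q4 h i) p) (x, y) (List.range' j cnt) := by
  induction cnt with
  | zero =>
      intro j x y hcnt
      have hnlt : ¬ ((2 : Int) ^ j < dim) := by
        rw [lt_iff_lt_altSteps]; omega
      rw [aLoop, dif_neg hnlt]
      simp
  | succ cnt ih =>
      intro j x y hcnt
      have hlt : (2 : Int) ^ j < dim := by rw [lt_iff_lt_altSteps]; omega
      have hrx : PySem.Int.band 1 ((h / 4 ^ j) >>> (1 : Nat)) = q4 h j / 2 := by
        rw [PySem.Int.band_comm, PySem.Int.band_one,
          PySem.Int.mod_eq_emod_of_pos (by norm_num), Int.shiftRight_eq_div_pow]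
        have : ((2 ^ (1 : Nat) : Nat) : Int) = 2 := by norm_num
        rw [this, q4]
        generalize h / 4 ^ j = z
        omega
      have hry : PySem.Int.band 1 (PySem.Int.bxor (h / 4 ^ j) (q4 h j / 2)) =
          (q4 h j + q4 h j / 2) % 2 := by
        rw [PySem.Int.band_comm, PySem.Int.band_one,
          PySem.Int.mod_eq_emod_of_pos (by norm_num), bxor_emod_two, q4]
        generalize h / 4 ^ j = z
        omega
      have hsh : (h / 4 ^ j) >>> (2 : Nat) = h / 4 ^ (j + 1) := by
        rw [Int.shiftRight_eq_div_pow]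
        have : ((2 ^ (2 : Nat) : Nat) : Int) = 4 := by norm_num
        have h4 : (4 : Int) ^ j * 4 = 4 ^ (j + 1) := by ring
        rw [this, Int.ediv_ediv_of_nonneg (by positivity), h4]
      have hlvl : (2 : Int) ^ j <<< (1 : Nat) = 2 ^ (j + 1) := by
        rw [Int.shiftLeft_eq]; ring
      rw [aLoop, dif_pos hlt]
      simp only [hrx, hry, hsh, hlvl]
      rw [List.range'_succ, List.foldl_cons]
      have := ih (j + 1)
        ((pyRotate (2 ^ j) x y (q4 h j / 2) ((q4 h j + q4 h j / 2) % 2)).1 + 2 ^ j * (q4 h j / 2))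
        ((pyRotate (2 ^ j) x y (q4 h j / 2) ((q4 h j + q4 h j / 2) % 2)).2 +
          2 ^ j * ((q4 h j + q4 h j / 2) % 2)) (by omega)
      rw [this]
      simp [astep]

theorem arec_foldl (h : Int) (n : Nat) :
    arec h n = List.foldl (fun p i => astep (2 ^ i) (q4 h i) p) (0, 0) (List.range n) := by
  induction n with
  | zero => simp [arec]
  | succ n ih => rw [List.range_succ, List.foldl_append, ← ih]; simp [arec]

theorem hash2xy_py_eq_arec (h dim : Int) : hash2xy_py h dim = arec h (altSteps dim 0) := by
  have := aLoop_foldl h dim (altSteps dim 0) 0 0 0 (by omega)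
  simp only [pow_zero, Int.ediv_one] at this
  rw [hash2xy_py, this, arec_foldl, List.range_eq_range']

theorem altBody_eq (h x y : Int) (sw fl : Bool) (n : Nat) :
    altBody h (x, y, sw, fl) n = bstep (q4 h n) x y sw fl := by
  have hqb : PySem.Int.mod (PySem.Int.floordiv h (4 ^ n)) 4 = q4 h n := by
    rw [PySem.Int.floordiv_eq_ediv_of_pos (by positivity),
      PySem.Int.mod_eq_emod_of_pos (by norm_num)]
    rfl
  have e1 : ∀ a : Int, PySem.Int.floordiv a 2 = a / 2 :=
    fun a => PySem.Int.floordiv_eq_ediv_of_pos (by norm_num)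
  have e2 : ∀ a : Int, PySem.Int.mod a 2 = a % 2 :=
    fun a => PySem.Int.mod_eq_emod_of_pos (by norm_num)
  simp only [altBody, bstep, hqb, e1, e2]

theorem core_step (q x y px py N : Int) (sw fl : Bool)
    (hq : q = 0 ∨ q = 1 ∨ q = 2 ∨ q = 3) :
    ((bstep q x y sw fl).1 * N +
      (Tr (bstep q x y sw fl).2.2.1 (bstep q x y sw fl).2.2.2 N (px, py)).1 =
      x * (N * 2) + (Tr sw fl (N * 2) (astep N q (px, py))).1) ∧
    ((bstep q x y sw fl).2.1 * N +
      (Tr (bstep q x y sw fl).2.2.1 (bstep q x y sw fl).2.2.2 N (px, py)).2 =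
      y * (N * 2) + (Tr sw fl (N * 2) (astep N q (px, py))).2) := by
  rcases hq with hq | hq | hq | hq <;> subst hq <;> cases sw <;> cases fl <;>
    · simp [bstep, Tr, astep, pyRotate]
      constructor <;> ring

theorem bfold (h : Int) (n : Nat) :
    ∀ (x y : Int) (sw fl : Bool),
      (((List.range n).reverse.foldl (altBody h) (x, y, sw, fl)).1 =
        x * 2 ^ n + (Tr sw fl (2 ^ n) (arec h n)).1) ∧
      (((List.range n).reverse.foldl (altBody h) (x, y, sw, fl)).2.1 =
        y * 2 ^ n + (Tr sw fl (2 ^ n) (arec h n)).2) := by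
  induction n with
  | zero =>
      intro x y sw fl
      cases sw <;> cases fl <;> simp [arec, Tr]
  | succ n ih =>
      intro x y sw fl
      simp only [List.range_succ, List.reverse_append, List.reverse_singleton,
        List.singleton_append, List.foldl_cons, altBody_eq]
      have hq4 : q4 h n = 0 ∨ q4 h n = 1 ∨ q4 h n = 2 ∨ q4 h n = 3 := by
        unfold q4; generalize h / 4 ^ n = z; omega
      have hB : bstep (q4 h n) x y sw fl =
          ((bstep (q4 h n) x y sw fl).1, (bstep (q4 h n) x y sw fl).2.1,
           (bstep (q4 h n) x y sw fl).2.2.1, (bstep (q4 h n) x y sw fl).2.2.2) := rfl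
      rw [hB]
      rcases ih (bstep (q4 h n) x y sw fl).1 (bstep (q4 h n) x y sw fl).2.1
        (bstep (q4 h n) x y sw fl).2.2.1 (bstep (q4 h n) x y sw fl).2.2.2 with ⟨ih1, ih2⟩
      rw [ih1, ih2]
      have harec : arec h (n + 1) = astep (2 ^ n) (q4 h n) ((arec h n).1, (arec h n).2) := rfl
      have hpow : (2 : Int) ^ (n + 1) = 2 ^ n * 2 := by ring
      rw [harec, hpow]
      exact core_step (q4 h n) x y (arec h n).1 (arec h n).2 (2 ^ n) sw fl hq4

-- ===== VERDICT (by name: the statement is the Claim_ definition above) =====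
theorem hash2xy_py_spec : Claim_equal_hash2xy_py := by
  intro hashcode dim _hdom _hpre
  unfold Spec_hash2xy_py
  rw [hash2xy_py_eq_arec]
  obtain ⟨h1, h2⟩ := bfold hashcode (altSteps dim 0) 0 0 false false
  have halt : hash2xy_py_alt hashcode dim =
      (((List.range (altSteps dim 0)).reverse.foldl (altBody hashcode) (0, 0, false, false)).1,
       ((List.range (altSteps dim 0)).reverse.foldl (altBody hashcode) (0, 0, false, false)).2.1) := rfl
  rw [halt, h1, h2]
  simp [Tr]
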